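-- pv_equiv track=rewrite | github.com/fengyanlei33/Fagales_mitogenome | Find_besthits_from_XML_BLAST_v1.0.py | CombineNumber2
-- ===== SOURCE A (Python) =====
-- def CombineNumber2( numbers, diff=1 ):
-- 	### CombineNumber2( [1,2,3,5,7,10,11,20,22], 2 ) -> [ [ 1,7 ], [ 10, 11 ], [ 20, 22 ] ]
-- 	## numbers = set( numbers ) # remove duplicates
-- 	## diff min 1
-- 	numbers = list( set( numbers ) )	# Unique
-- 	numbers.sort()	# put numbers in order
-- 	start = numbers[0]
-- 	end = numbers[0]
-- 	out = []
-- 	for i in range( 1, len( numbers ) ):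
-- 		if numbers[i] - numbers[i-1] < diff + 1:
-- 			end = numbers[i]
-- 		else:
-- 			out.append( [ start, end ] )
-- 			start = numbers[i]
-- 			end = numbers[i]
-- 	## add the last iteration
-- 	out.append( [ start, end ] )
-- 	return out
-- ===== SOURCE B (Python) =====
-- def CombineNumber2(numbers, diff=1):
--     s = sorted(set(numbers))
--     gaps = [(x, y) for x, y in zip(s, s[1:]) if y - x > diff]
--     starts = [s[0]] + [y for x, y in gaps]
--     ends = [x for x, y in gaps] + [s[-1]]
--     return [[a, b] for a, b in zip(starts, ends)]
-- ===== Notes on version B (the rewrite author's own statement) =====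
-- stated objective: alternative
-- what changed: Instead of an incremental start/end state machine with an output accumulator, B computes the set of large gaps once and builds the ranges declaratively by zipping the gap right-ends (range starts) with the gap left-ends (range ends).
import Mathlib
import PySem

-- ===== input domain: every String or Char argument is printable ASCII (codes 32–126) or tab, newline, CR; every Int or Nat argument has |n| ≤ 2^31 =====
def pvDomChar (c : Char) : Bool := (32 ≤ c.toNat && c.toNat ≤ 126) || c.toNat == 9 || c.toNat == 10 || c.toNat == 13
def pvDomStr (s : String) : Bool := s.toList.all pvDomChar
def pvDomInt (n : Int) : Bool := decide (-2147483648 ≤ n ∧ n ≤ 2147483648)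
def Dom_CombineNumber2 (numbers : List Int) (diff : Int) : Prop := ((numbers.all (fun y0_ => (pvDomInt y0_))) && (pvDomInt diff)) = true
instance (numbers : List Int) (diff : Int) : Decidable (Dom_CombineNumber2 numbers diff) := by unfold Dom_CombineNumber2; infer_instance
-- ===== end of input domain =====

-- B replaces A's incremental start/end accumulator loop by a declarative gap-based
-- construction (zip the right ends of large gaps with their left ends); objective: alternative.

-- ===== PORT A =====
def CombineNumber2 (numbers : List Int) (diff : Int) : List (List Int) :=
  let nums := PySem.List.sorted (PySem.Set.ofList numbers) (fun x => x) false
  let start := PySem.List.pyGetD nums 0 0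
  let endv := PySem.List.pyGetD nums 0 0
  let st := (PySem.List.pyRange 1 (nums.length : Int) 1).foldl
    (fun (st : Int × Int × List (List Int)) i =>
      if PySem.List.pyGetD nums i 0 - PySem.List.pyGetD nums (i-1) 0 < diff + 1 then
        (st.1, PySem.List.pyGetD nums i 0, st.2.2)
      else
        (PySem.List.pyGetD nums i 0, PySem.List.pyGetD nums i 0, st.2.2 ++ [[st.1, st.2.1]]))
    (start, endv, ([] : List (List Int)))
  st.2.2 ++ [[st.1, st.2.1]]

-- ===== PORT B =====
def CombineNumber2_alt (numbers : List Int) (diff : Int) : List (List Int) :=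
  let s := PySem.List.sorted (PySem.Set.ofList numbers) (fun x => x) false
  let gaps := (s.zip (s.drop 1)).filter (fun p => decide (p.2 - p.1 > diff))
  let starts := [PySem.List.pyGetD s 0 0] ++ gaps.map (fun p => p.2)
  let ends := gaps.map (fun p => p.1) ++ [PySem.List.pyGetD s (-1) 0]
  (starts.zip ends).map (fun p => [p.1, p.2])

-- ===== PRECONDITION & SPEC =====
-- A (numbers[0]) and B (s[0]) both raise IndexError on the empty list; Pre_ excludes exactly that.
def Pre_CombineNumber2 (numbers : List Int) (diff : Int) : Prop := numbers ≠ []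
instance (numbers : List Int) (diff : Int) : Decidable (Pre_CombineNumber2 numbers diff) := by unfold Pre_CombineNumber2; infer_instance
def pvWitness_CombineNumber2 : List Int × Int := ([1, 2, 3, 5, 7, 10, 11, 20, 22], 2)

def Spec_CombineNumber2 (numbers : List Int) (diff : Int) (out : List (List Int)) : Prop := out = CombineNumber2_alt numbers diff
instance (numbers : List Int) (diff : Int) (out : List (List Int)) : Decidable (Spec_CombineNumber2 numbers diff out) := by unfold Spec_CombineNumber2; infer_instance

-- ===== CLAIM (what is proved, stated in full; the proofs are below) =====
def Claim_equal_CombineNumber2 : Prop := ∀ (numbers : List Int) (diff : Int), Dom_CombineNumber2 numbers diff → Pre_CombineNumber2 numbers diff → Spec_CombineNumber2 numbers diff (CombineNumber2 numbers diff)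

-- ===== LEMMAS AND PROOFS =====

def pvFin (r : Int × Int × List (List Int)) : List (List Int) := r.2.2 ++ [[r.1, r.2.1]]

theorem pvLast_cons_cons (a b : Int) (l : List Int) :
    PySem.List.pyGetD (a :: b :: l) (-1) 0 = PySem.List.pyGetD (b :: l) (-1) 0 := by
  rw [PySem.List.pyGetD_neg_one (a :: b :: l) 0 (by simp),
      PySem.List.pyGetD_neg_one (b :: l) 0 (by simp)]
  simp [List.getLast_cons]

/-- The pairs A's index loop reads along `range(1, len s)` are the adjacent pairs of `s`. -/
theorem pvRangeMap_eq_zip (s : List Int) :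
    (PySem.List.pyRange 1 (s.length : Int) 1).map
      (fun i => (PySem.List.pyGetD s (i - 1) 0, PySem.List.pyGetD s i 0))
      = s.zip (s.drop 1) := by
  apply List.ext_getElem
  · simp [PySem.List.length_pyRange_one]
  · intro k h1 h2
    have hk : k < s.length - 1 := by
      simpa [PySem.List.length_pyRange_one] using h1
    have hr : (PySem.List.pyRange 1 (s.length : Int) 1)[k]'(by
        simpa [PySem.List.length_pyRange_one] using h1) = 1 + (k : Int) :=
      PySem.List.getElem_pyRange_one _ _ _ _
    simp only [List.getElem_map, hr, List.getElem_zip, List.getElem_drop]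
    have e1 : (1 : Int) + (k : Int) - 1 = ((k : Nat) : Int) := by omega
    have e2 : (1 : Int) + (k : Int) = (((k + 1 : Nat)) : Int) := by omega
    rw [e1, e2, PySem.List.pyGetD_natCast, PySem.List.pyGetD_natCast,
        List.getD_eq_getElem _ _ (by omega), List.getD_eq_getElem _ _ (by omega)]
    simp [Nat.add_comm]

/-- A's index-driven fold equals the same fold over the adjacent-pair list. -/
theorem pvIdxFold (s : List Int) (diff : Int) (init : Int × Int × List (List Int)) :
    List.foldl
      (fun (st : Int × Int × List (List Int)) i =>
        if PySem.List.pyGetD s i 0 - PySem.List.pyGetD s (i - 1) 0 < diff + 1 then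
          (st.1, PySem.List.pyGetD s i 0, st.2.2)
        else (PySem.List.pyGetD s i 0, PySem.List.pyGetD s i 0, st.2.2 ++ [[st.1, st.2.1]]))
      init (PySem.List.pyRange 1 (s.length : Int) 1)
    = List.foldl
        (fun (st : Int × Int × List (List Int)) p =>
          if p.2 - p.1 < diff + 1 then (st.1, p.2, st.2.2)
          else (p.2, p.2, st.2.2 ++ [[st.1, st.2.1]]))
        init (s.zip (s.drop 1)) := by
  rw [← pvRangeMap_eq_zip, List.foldl_map]

/-- Core equivalence, generalized over the loop state: A's accumulator fold over the
adjacent pairs of `prev :: rest` produces `out` followed by B's gap-based construction. -/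
theorem pvCore (diff : Int) : ∀ (rest : List Int) (start prev : Int) (out : List (List Int)),
    pvFin (((prev :: rest).zip rest).foldl
      (fun (st : Int × Int × List (List Int)) p =>
        if p.2 - p.1 < diff + 1 then (st.1, p.2, st.2.2)
        else (p.2, p.2, st.2.2 ++ [[st.1, st.2.1]]))
      (start, prev, out))
    = out ++
      ((start :: (((prev :: rest).zip rest).filter
            (fun p => decide (p.2 - p.1 > diff))).map (fun p => p.2)).zip
        ((((prev :: rest).zip rest).filter
            (fun p => decide (p.2 - p.1 > diff))).map (fun p => p.1)
          ++ [PySem.List.pyGetD (prev :: rest) (-1) 0])).map (fun p => [p.1, p.2]) := by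
  intro rest
  induction rest with
  | nil =>
      intro start prev out
      simp [pvFin, PySem.List.pyGetD_neg_one [prev] 0 (by simp)]
  | cons x t ih =>
      intro start prev out
      by_cases hc : x - prev < diff + 1
      · have hnc : ¬ (diff < x - prev) := by omega
        simp only [List.zip_cons_cons, List.foldl_cons, List.filter_cons, decide_eq_true_eq,
          hc, if_true, hnc, if_false, pvLast_cons_cons]
        exact ih start x out
      · have hg : diff < x - prev := by omega
        simp only [List.zip_cons_cons, List.foldl_cons, List.filter_cons, decide_eq_true_eq,
          if_neg hc, if_pos hg, pvLast_cons_cons]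
        rw [ih x x (out ++ [[start, prev]])]
        simp

-- ===== VERDICT (by name: the statement is the Claim_ definition above) =====
theorem CombineNumber2_spec : Claim_equal_CombineNumber2 := by
  intro numbers diff _ hpre
  unfold Spec_CombineNumber2 CombineNumber2 CombineNumber2_alt
  have hs : PySem.List.sorted (PySem.Set.ofList numbers) (fun x => x) false ≠ [] := by
    rw [Ne, PySem.List.sorted_eq_nil_iff]
    intro h
    cases numbers with
    | nil => exact hpre rfl
    | cons x r =>
        have hx : x ∈ PySem.Set.ofList (x :: r) := by
          rw [PySem.Set.mem_ofList]; exact List.mem_cons_self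
        rw [h] at hx
        exact (List.not_mem_nil) hx
  generalize hgen : PySem.List.sorted (PySem.Set.ofList numbers) (fun x => x) false = s
  rw [hgen] at hs
  obtain ⟨a, t, rfl⟩ := List.exists_cons_of_ne_nil hs
  show (List.foldl
      (fun (st : Int × Int × List (List Int)) i =>
        if PySem.List.pyGetD (a :: t) i 0 - PySem.List.pyGetD (a :: t) (i - 1) 0 < diff + 1 then
          (st.1, PySem.List.pyGetD (a :: t) i 0, st.2.2)
        else (PySem.List.pyGetD (a :: t) i 0, PySem.List.pyGetD (a :: t) i 0,
          st.2.2 ++ [[st.1, st.2.1]]))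
      (PySem.List.pyGetD (a :: t) 0 0, PySem.List.pyGetD (a :: t) 0 0, [])
      (PySem.List.pyRange 1 ((a :: t).length : Int) 1)).2.2 ++ [[_, _]]
    = List.map (fun p => [p.1, p.2])
        (([PySem.List.pyGetD (a :: t) 0 0] ++
            List.map (fun p => p.2)
              (List.filter (fun p => decide (p.2 - p.1 > diff)) ((a :: t).zip (List.drop 1 (a :: t))))).zip
          (List.map (fun p => p.1)
              (List.filter (fun p => decide (p.2 - p.1 > diff)) ((a :: t).zip (List.drop 1 (a :: t)))) ++
            [PySem.List.pyGetD (a :: t) (-1) 0]))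
  rw [pvIdxFold, PySem.List.pyGetD_zero_cons, show List.drop 1 (a :: t) = t from rfl]
  simpa [pvFin] using pvCore diff t a a []
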